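-- pv_equiv track=rewrite | github.com/Nothingaholic/100-days-of-code | 88-matching-rules.py | countMatches
-- ===== SOURCE A (Python) =====
-- def countMatches(items, ruleKey, ruleValue):
--     count = 0
--     for item in items:
--         if ruleKey == "type" and ruleValue == item[0]:
--             count += 1
--         if ruleKey == "color" and ruleValue == item[1]:
--             count += 1
--         if ruleKey == "name" and ruleValue == item[2]:
--             count += 1
--     return count
-- ===== SOURCE B (Python) =====
-- def countMatches(items, ruleKey, ruleValue):
--     try:
--         idx = ("type", "color", "name").index(ruleKey)
--     except ValueError:
--         return 0
--     freq = {}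
--     for item in items:
--         v = item[idx]
--         freq[v] = freq.get(v, 0) + 1
--     return freq.get(ruleValue, 0)
-- ===== Notes on version B (the rewrite author's own statement) =====
-- stated objective: alternative
-- what changed: B resolves the rule to a column index once, then builds a frequency table of that column's values (a counter dict) and answers with a single lookup freq.get(ruleValue, 0), instead of testing the rule against each item inside the loop.
import Mathlib
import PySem

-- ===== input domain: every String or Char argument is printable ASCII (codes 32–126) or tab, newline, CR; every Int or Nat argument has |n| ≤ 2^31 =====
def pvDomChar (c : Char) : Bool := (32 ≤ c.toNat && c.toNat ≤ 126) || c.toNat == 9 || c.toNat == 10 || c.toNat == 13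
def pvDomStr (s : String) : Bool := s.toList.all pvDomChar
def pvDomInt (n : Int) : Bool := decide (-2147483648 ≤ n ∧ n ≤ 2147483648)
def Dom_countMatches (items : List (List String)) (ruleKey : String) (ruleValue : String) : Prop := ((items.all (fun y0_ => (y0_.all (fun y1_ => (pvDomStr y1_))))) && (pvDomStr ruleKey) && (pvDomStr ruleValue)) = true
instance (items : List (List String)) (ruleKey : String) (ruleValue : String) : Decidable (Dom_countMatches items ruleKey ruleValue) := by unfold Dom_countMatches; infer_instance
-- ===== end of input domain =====

-- B resolves the rule to a column index once, then builds a frequency table of that column and answers with one lookup (alternative decomposition, same cost).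


-- ===== PORT A =====
-- literal fold over the list keeping the running count; item[i] ported via pyGetD
-- (inside Pre_ the indexed access is in range, so the default "" is never the value used)
def countMatches (items : List (List String)) (ruleKey : String) (ruleValue : String) : Int :=
  items.foldl (fun count item =>
    let count := if ruleKey == "type" && ruleValue == PySem.List.pyGetD item 0 "" then count + 1 else count
    let count := if ruleKey == "color" && ruleValue == PySem.List.pyGetD item 1 "" then count + 1 else count
    let count := if ruleKey == "name" && ruleValue == PySem.List.pyGetD item 2 "" then count + 1 else count
    count) 0

-- ===== PORT B =====
-- try: idx = ("type","color","name").index(ruleKey) except ValueError: return 0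
-- then build freq = {v: multiplicity} of the idx-column and return freq.get(ruleValue, 0)
def countMatches_alt (items : List (List String)) (ruleKey : String) (ruleValue : String) : Int :=
  match PySem.List.index? ["type", "color", "name"] ruleKey with
  | none => 0
  | some idx =>
    (items.foldl (fun freq item =>
        let v := PySem.List.pyGetD item (idx : Int) ""
        freq.insert v (freq.getD v 0 + 1)) PySem.Dict.empty).getD ruleValue 0

-- ===== PRECONDITION & SPEC =====
-- Pre_ excludes exactly the inputs where A raises IndexError: when ruleKey names a column,
-- every item must be long enough to have that column (B raises there too).
def Pre_countMatches (items : List (List String)) (ruleKey : String) (ruleValue : String) : Prop :=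
  (ruleKey = "type" → ∀ item ∈ items, 1 ≤ item.length) ∧
  (ruleKey = "color" → ∀ item ∈ items, 2 ≤ item.length) ∧
  (ruleKey = "name" → ∀ item ∈ items, 3 ≤ item.length)
instance (items : List (List String)) (ruleKey : String) (ruleValue : String) : Decidable (Pre_countMatches items ruleKey ruleValue) := by unfold Pre_countMatches; infer_instance

def pvWitness_countMatches : List (List String) × String × String := ([["a", "red", "n1"], ["b", "red", "n2"]], "color", "red")

def Spec_countMatches (items : List (List String)) (ruleKey : String) (ruleValue : String) (out : Int) : Prop := out = countMatches_alt items ruleKey ruleValue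
instance (items : List (List String)) (ruleKey : String) (ruleValue : String) (out : Int) : Decidable (Spec_countMatches items ruleKey ruleValue out) := by unfold Spec_countMatches; infer_instance

-- ===== CLAIM =====
def Claim_equal_countMatches : Prop := ∀ (items : List (List String)) (ruleKey : String) (ruleValue : String), Dom_countMatches items ruleKey ruleValue → Pre_countMatches items ruleKey ruleValue → Spec_countMatches items ruleKey ruleValue (countMatches items ruleKey ruleValue)

-- ===== LEMMAS AND PROOFS =====

-- the step function of A's fold
def stepA (ruleKey ruleValue : String) (count : Int) (item : List String) : Int :=
  let count := if ruleKey == "type" && ruleValue == PySem.List.pyGetD item 0 "" then count + 1 else count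
  let count := if ruleKey == "color" && ruleValue == PySem.List.pyGetD item 1 "" then count + 1 else count
  let count := if ruleKey == "name" && ruleValue == PySem.List.pyGetD item 2 "" then count + 1 else count
  count

theorem stepA_shift (ruleKey ruleValue : String) :
    ∀ (c : Int) (item : List String), stepA ruleKey ruleValue c item = c + stepA ruleKey ruleValue 0 item := by
  intro c item
  simp only [stepA]
  split_ifs <;> ring

-- A's fold shifts its accumulator: foldl from c = c + foldl from 0
theorem countMatches_foldl_shift (items : List (List String)) (ruleKey ruleValue : String) :
    ∀ c : Int, items.foldl (stepA ruleKey ruleValue) c = c + items.foldl (stepA ruleKey ruleValue) 0 := by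
  induction items with
  | nil => intro c; simp
  | cons hd tl ih =>
    intro c
    simp only [List.foldl_cons]
    rw [ih (stepA ruleKey ruleValue c hd), ih (stepA ruleKey ruleValue 0 hd), stepA_shift ruleKey ruleValue c hd]
    ring

theorem countMatches_eq_foldl (items : List (List String)) (ruleKey ruleValue : String) :
    countMatches items ruleKey ruleValue = items.foldl (stepA ruleKey ruleValue) 0 := rfl

-- when ruleKey names column i, A's fold counts the items whose column-i value is ruleValue
theorem countA_count (items : List (List String)) (ruleKey ruleValue : String) (i : Int)
    (hstep : ∀ item : List String, stepA ruleKey ruleValue 0 item =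
      if PySem.List.pyGetD item i "" == ruleValue then 1 else 0) :
    items.foldl (stepA ruleKey ruleValue) 0 =
      (((items.map (fun item => PySem.List.pyGetD item i "")).count ruleValue : Nat) : Int) := by
  induction items with
  | nil => rfl
  | cons hd tl ih =>
    simp only [List.foldl_cons, List.map_cons, List.count_cons]
    rw [countMatches_foldl_shift tl ruleKey ruleValue, ih, hstep hd]
    split_ifs with h
    · simp; ring
    · simp

-- when ruleKey is none of the three keys, A's fold never increments
theorem countA_other (items : List (List String)) (ruleKey ruleValue : String)
    (h1 : ruleKey ≠ "type") (h2 : ruleKey ≠ "color") (h3 : ruleKey ≠ "name") :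
    items.foldl (stepA ruleKey ruleValue) 0 = 0 := by
  induction items with
  | nil => rfl
  | cons hd tl ih =>
    have e1 : (ruleKey == "type") = false := by simpa using h1
    have e2 : (ruleKey == "color") = false := by simpa using h2
    have e3 : (ruleKey == "name") = false := by simpa using h3
    have hstep : stepA ruleKey ruleValue 0 hd = 0 := by
      simp only [stepA, e1, e2, e3, Bool.false_and]
      simp
    simp only [List.foldl_cons]
    rw [hstep, ih]

-- B's counter fold over column i: the final lookup is the multiplicity of ruleValue in that column
theorem altFreq_aux (items : List (List String)) (ruleValue : String) (i : Int) :
    ∀ d : PySem.Dict String Int,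
    (items.foldl (fun freq item =>
        let v := PySem.List.pyGetD item i ""
        freq.insert v (freq.getD v 0 + 1)) d).getD ruleValue 0 =
      d.getD ruleValue 0 + (((items.map (fun item => PySem.List.pyGetD item i "")).count ruleValue : Nat) : Int) := by
  induction items with
  | nil => intro d; simp
  | cons hd tl ih =>
    intro d
    simp only [List.foldl_cons, List.map_cons, List.count_cons]
    rw [ih, PySem.Dict.getD_insert]
    by_cases h : ruleValue = PySem.List.pyGetD hd i ""
    · simp only [h]
      rw [h] at *
      simp
      ring
    · have hb : (PySem.List.pyGetD hd i "" == ruleValue) = false := by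
        simpa using fun e => h e.symm
      simp [h, hb]

-- ===== VERDICT =====
theorem countMatches_spec : Claim_equal_countMatches := by
  intro items ruleKey ruleValue _ _
  unfold Spec_countMatches
  rw [countMatches_eq_foldl]
  by_cases h1 : ruleKey = "type"
  · subst h1
    simp only [countMatches_alt,
      show PySem.List.index? ["type", "color", "name"] "type" = some 0 from by decide]
    rw [show ((0 : Nat) : Int) = (0 : Int) from rfl, altFreq_aux items ruleValue 0 PySem.Dict.empty]
    rw [countA_count items _ ruleValue 0]
    · simp
    intro item
    simp only [stepA]
    split_ifs with a b c <;> simp_all [BEq.comm]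
  · by_cases h2 : ruleKey = "color"
    · subst h2
      simp only [countMatches_alt,
        show PySem.List.index? ["type", "color", "name"] "color" = some 1 from by decide]
      rw [show ((1 : Nat) : Int) = (1 : Int) from rfl, altFreq_aux items ruleValue 1 PySem.Dict.empty]
      rw [countA_count items _ ruleValue 1]
      · simp
      intro item
      simp only [stepA]
      split_ifs with a b c <;> simp_all [BEq.comm]
    · by_cases h3 : ruleKey = "name"
      · subst h3
        simp only [countMatches_alt,
          show PySem.List.index? ["type", "color", "name"] "name" = some 2 from by decide]
        rw [show ((2 : Nat) : Int) = (2 : Int) from rfl, altFreq_aux items ruleValue 2 PySem.Dict.empty]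
        rw [countA_count items _ ruleValue 2]
        · simp
        intro item
        simp only [stepA]
        split_ifs with a b c <;> simp_all [BEq.comm]
      · have hn : PySem.List.index? ["type", "color", "name"] ruleKey = none := by
          rw [PySem.List.index?_eq_none_iff]
          simp [h1, h2, h3]
        simp only [countMatches_alt, hn]
        rw [countA_other items ruleKey ruleValue h1 h2 h3]
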